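-- pv_equiv track=rewrite | github.com/brodie-neuro/WAND-practice-and-fatigue-induction | wand_nback/launcher.py | extract_schedules
-- ===== SOURCE A (Python) =====
-- def extract_schedules(block_order):
--     """
--     Extract breaks_schedule and measures_schedule from the visual block order.
--
--     Logic:
--     - Scans blocks linearly.
--     - Counts task blocks (SEQ/SPA/DUAL) to determine current cycle.
--     - If a Break/Measure is found, it is assigned to the current cycle.
--
--     Note: Block builder generates labels like "SEQ", "SPA" without numbers,
--     so we count task blocks seen to determine the cycle.
--     """
--     breaks = set()
--     measures = set()
--     task_block_count = 0  # Count of task blocks seen so far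
--
--     for block in block_order:
--         block_type = block.get("type", "")
--
--         # Count task blocks to determine cycle
--         if block_type in ("seq", "spa", "dual"):
--             task_block_count += 1
--
--         # Assign breaks/measures to current cycle (count of task blocks seen)
--         # Use max(1, count) so events before first task go to cycle 1
--         current_cycle = max(1, task_block_count)
--
--         if block_type == "break":
--             breaks.add(current_cycle)
--         elif block_type == "measures":
--             measures.add(current_cycle)
--
--     return sorted(list(breaks)), sorted(list(measures))
-- ===== SOURCE B (Python) =====
-- def extract_schedules(block_order):
--     """Stateless per-event recount: no running counter is maintained.  Each
--     break/measure event independently recounts the task blocks in its own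
--     prefix slice (nested scans) to find its cycle number."""
--     types = [b.get("type", "") for b in block_order]
--
--     def cycle(i):
--         return max(1, sum(1 for t in types[:i + 1] if t in ("seq", "spa", "dual")))
--
--     breaks = sorted({cycle(i) for i, t in enumerate(types) if t == "break"})
--     measures = sorted({cycle(i) for i, t in enumerate(types) if t == "measures"})
--     return breaks, measures
-- ===== Notes on version B (the rewrite author's own statement) =====
-- stated objective: alternative
-- what changed: Replaced A's single streaming pass (a mutating task-block counter interleaved with two set updates) with a stateless formulation: each break/measure event independently recounts the task blocks in its own prefix slice (nested scans, no accumulator), traded for O(n^2) worst-case cost.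
import Mathlib
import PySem

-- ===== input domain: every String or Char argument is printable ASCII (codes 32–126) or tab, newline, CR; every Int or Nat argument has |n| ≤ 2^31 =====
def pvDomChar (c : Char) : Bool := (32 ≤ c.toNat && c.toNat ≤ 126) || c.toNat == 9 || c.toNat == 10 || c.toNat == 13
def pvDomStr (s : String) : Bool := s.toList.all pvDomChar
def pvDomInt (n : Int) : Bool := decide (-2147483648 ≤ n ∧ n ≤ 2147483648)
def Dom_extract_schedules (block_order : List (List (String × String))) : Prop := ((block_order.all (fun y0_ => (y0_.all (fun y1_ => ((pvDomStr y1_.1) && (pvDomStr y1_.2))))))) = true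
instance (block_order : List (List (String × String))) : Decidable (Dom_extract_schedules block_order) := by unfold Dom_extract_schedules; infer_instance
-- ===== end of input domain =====

-- B replaces A's streaming counter with a stateless per-event recount over prefix
-- slices (nested scans, no accumulator); objective: alternative algorithm, not faster.

-- ===== PORT A =====
-- one interleaved pass: state = (breaks set, measures set, task_block_count)
def extract_schedules (block_order : List (List (String × String))) : List Int × List Int :=
  let st := block_order.foldl
    (fun (st : PySem.Set Int × PySem.Set Int × Int) block =>
      let block_type := PySem.Dict.getD ⟨block⟩ "type" ""
      let task_block_count :=
        if block_type = "seq" ∨ block_type = "spa" ∨ block_type = "dual" then st.2.2 + 1 else st.2.2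
      let current_cycle := max 1 task_block_count
      let breaks := if block_type = "break" then PySem.Set.add st.1 current_cycle else st.1
      let measures :=
        if block_type = "break" then st.2.1
        else if block_type = "measures" then PySem.Set.add st.2.1 current_cycle else st.2.1
      (breaks, measures, task_block_count))
    (PySem.Set.empty, PySem.Set.empty, 0)
  (PySem.List.sorted st.1 (fun x => x) false, PySem.List.sorted st.2.1 (fun x => x) false)

-- ===== PORT B =====
-- Source B: types list, then for each event a fresh recount of its prefix slice
def extract_schedules_alt (block_order : List (List (String × String))) : List Int × List Int :=
  let types := block_order.map (fun b => PySem.Dict.getD ⟨b⟩ "type" "")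
  let cycle : Int → Int := fun i =>
    max 1 (((PySem.List.slice types none (some (i + 1))).countP
              (fun t => t == "seq" || t == "spa" || t == "dual") : Nat) : Int)
  let breaks : PySem.Set Int := PySem.Set.ofList
    ((PySem.List.enumerate types 0).filterMap
      (fun it => if it.2 = "break" then some (cycle it.1) else none))
  let measures : PySem.Set Int := PySem.Set.ofList
    ((PySem.List.enumerate types 0).filterMap
      (fun it => if it.2 = "measures" then some (cycle it.1) else none))
  (PySem.List.sorted breaks (fun x => x) false, PySem.List.sorted measures (fun x => x) false)

-- ===== PRECONDITION & SPEC =====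
def Spec_extract_schedules (block_order : List (List (String × String))) (out : List Int × List Int) : Prop := out = extract_schedules_alt block_order
instance (block_order : List (List (String × String))) (out : List Int × List Int) : Decidable (Spec_extract_schedules block_order out) := by unfold Spec_extract_schedules; infer_instance

-- ===== CLAIM (what is proved, stated in full; the proofs are below) =====
def Claim_equal_extract_schedules : Prop := ∀ (block_order : List (List (String × String))), Dom_extract_schedules block_order → Spec_extract_schedules block_order (extract_schedules block_order)

-- ===== LEMMAS AND PROOFS =====

-- is this type string a task block?
def pvTask (t : String) : Bool := t == "seq" || t == "spa" || t == "dual"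

-- task count of a list of type strings, as Int
def pvCnt (l : List String) : Int := ((l.countP pvTask : Nat) : Int)

-- streaming step on the count
def pvStepS (t : String) (c : Int) : Int := if pvTask t then c + 1 else c

-- cycle list for one event key, streaming form, over type strings
def pvBrkS (key : String) : List String → Int → List Int
  | [], _ => []
  | t :: r, c => (if t = key then [max 1 (pvStepS t c)] else []) ++ pvBrkS key r (pvStepS t c)

-- same over raw blocks (A's shape)
def pvBrk (key : String) : List (List (String × String)) → Int → List Int
  | [], _ => []
  | b :: t, c =>
      (if PySem.Dict.getD ⟨b⟩ "type" "" = key then [max 1 (pvStepS (PySem.Dict.getD ⟨b⟩ "type" "") c)] else [])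
        ++ pvBrk key t (pvStepS (PySem.Dict.getD ⟨b⟩ "type" "") c)

lemma pvBrk_map (key : String) (l : List (List (String × String))) (c : Int) :
    pvBrk key l c = pvBrkS key (l.map (fun b => PySem.Dict.getD ⟨b⟩ "type" "")) c := by
  induction l generalizing c with
  | nil => simp [pvBrk, pvBrkS]
  | cons b t ih => simp [pvBrk, pvBrkS, ih]

lemma pvCnt_append_singleton (p : List String) (t : String) :
    pvCnt (p ++ [t]) = pvStepS t (pvCnt p) := by
  unfold pvCnt pvStepS
  by_cases h : pvTask t <;> simp [h, List.countP_append]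

-- A's fold state from (bs, ms, c) over l
lemma pvAfold (l : List (List (String × String))) (bs ms : PySem.Set Int) (c : Int) :
    (l.foldl
      (fun (st : PySem.Set Int × PySem.Set Int × Int) block =>
        let block_type := PySem.Dict.getD ⟨block⟩ "type" ""
        let task_block_count :=
          if block_type = "seq" ∨ block_type = "spa" ∨ block_type = "dual" then st.2.2 + 1 else st.2.2
        let current_cycle := max 1 task_block_count
        let breaks := if block_type = "break" then PySem.Set.add st.1 current_cycle else st.1
        let measures :=
          if block_type = "break" then st.2.1
          else if block_type = "measures" then PySem.Set.add st.2.1 current_cycle else st.2.1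
        (breaks, measures, task_block_count)) (bs, ms, c))
    = (PySem.Set.update bs (pvBrk "break" l c),
       PySem.Set.update ms (pvBrk "measures" l c),
       c + pvCnt (l.map (fun b => PySem.Dict.getD ⟨b⟩ "type" ""))) := by
  induction l generalizing bs ms c with
  | nil => simp [pvBrk, pvCnt, PySem.Set.update]
  | cons b t ih =>
    have htask : (PySem.Dict.getD ⟨b⟩ "type" "" = "seq" ∨ PySem.Dict.getD ⟨b⟩ "type" "" = "spa"
        ∨ PySem.Dict.getD ⟨b⟩ "type" "" = "dual") ↔ pvTask (PySem.Dict.getD ⟨b⟩ "type" "") = true := by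
      simp only [pvTask, Bool.or_eq_true, beq_iff_eq]; tauto
    simp only [List.foldl_cons, pvBrk, PySem.Set.update, List.foldl_append, List.map_cons, pvCnt,
      List.countP_cons]
    by_cases hb : PySem.Dict.getD ⟨b⟩ "type" "" = "break"
    · simp [hb, ih, PySem.Set.update, pvStepS, pvCnt, pvTask]
    · by_cases hm : PySem.Dict.getD ⟨b⟩ "type" "" = "measures"
      · simp [hm, ih, PySem.Set.update, pvStepS, pvCnt, pvTask]
      · by_cases ht : PySem.Dict.getD ⟨b⟩ "type" "" = "seq" ∨ PySem.Dict.getD ⟨b⟩ "type" "" = "spa"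
            ∨ PySem.Dict.getD ⟨b⟩ "type" "" = "dual"
        · have ht' : pvTask (PySem.Dict.getD ⟨b⟩ "type" "") = true := htask.mp ht
          simp [hb, hm, ht, ht', ih, PySem.Set.update, pvStepS, pvCnt]
          ring
        · have ht' : pvTask (PySem.Dict.getD ⟨b⟩ "type" "") = false := by
            rcases h : pvTask (PySem.Dict.getD ⟨b⟩ "type" "") with _ | _
            · rfl
            · exact absurd (htask.mpr h) ht
          simp [hb, hm, ht, ht', ih, PySem.Set.update, pvStepS, pvCnt]

-- B's per-event recount over a suffix equals the streaming cycle list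
lemma pvBalt (key : String) (rest p : List String) :
    (PySem.List.enumerate rest (p.length : Int)).filterMap
      (fun it => if it.2 = key then
          some (max 1 (((PySem.List.slice (p ++ rest) none (some (it.1 + 1))).countP pvTask : Nat) : Int))
        else none)
      = pvBrkS key rest (pvCnt p) := by
  induction rest generalizing p with
  | nil => simp [pvBrkS]
  | cons t r ih =>
    have hslice : PySem.List.slice (p ++ t :: r) none (some ((p.length : Int) + 1)) = p ++ [t] := by
      have : ((p.length : Int) + 1) = ((p.length + 1 : Nat) : Int) := by push_cast; ring
      rw [this, PySem.List.slice_to_natCast]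
      simp [List.take_append]
    have hrec := ih (p ++ [t])
    rw [List.append_assoc] at hrec
    simp only [List.singleton_append] at hrec
    have hlen : (((p ++ [t]).length : Nat) : Int) = (p.length : Int) + 1 := by simp
    rw [hlen, pvCnt_append_singleton] at hrec
    have hc : ((List.countP pvTask (p ++ [t]) : Nat) : Int) = pvStepS t (pvCnt p) := by
      simpa [pvCnt] using pvCnt_append_singleton p t
    simp only [PySem.List.enumerate_cons, List.filterMap_cons]
    by_cases hk : t = key
    · subst hk
      simp [hslice, hrec, pvBrkS]
      by_cases h : pvTask t <;> simp [pvStepS, pvCnt, h]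
    · simp [hk, hrec, pvBrkS]

-- ===== VERDICT (by name: the statement is the Claim_ definition above) =====
theorem extract_schedules_spec : Claim_equal_extract_schedules := by
  intro block_order _
  unfold Spec_extract_schedules extract_schedules extract_schedules_alt
  have hbeq : (fun t : String => t == "seq" || t == "spa" || t == "dual") = pvTask := by
    funext t; rfl
  have hb := pvBalt "break" (block_order.map (fun b => PySem.Dict.getD ⟨b⟩ "type" "")) []
  have hm := pvBalt "measures" (block_order.map (fun b => PySem.Dict.getD ⟨b⟩ "type" "")) []
  simp only [List.nil_append, List.length_nil, Nat.cast_zero, pvCnt, List.countP_nil] at hb hm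
  simp only [pvAfold, hbeq, hb, hm, pvBrk_map]
  simp [PySem.Set.ofList_eq_foldl, PySem.Set.update]
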